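-- pv_equiv track=rewrite | github.com/rouseway/DeeplearningNLP | seq2seq/data_process.py | pad_sentence_batch
-- ===== SOURCE A (Python) =====
-- def pad_sentence_batch(sentence_batch, pad_int, max_sent_len=None):
--     if max_sent_len == None:
--         max_sent_len = max([ len(sentence) for sentence in sentence_batch ])
--         return [ sentence + [pad_int] * (max_sent_len - len(sentence)) for sentence in sentence_batch ]
--     else:
--         ret = []
--         for sentence in sentence_batch:
--             if len(sentence) < max_sent_len:
--                 ret.append(sentence + [pad_int] * (max_sent_len-len(sentence)))
--             else:
--                 ret.append(sentence[:max_sent_len])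
--         return ret
-- ===== SOURCE B (Python) =====
-- def pad_sentence_batch(sentence_batch, pad_int, max_sent_len=None):
--     if max_sent_len is None:
--         max_sent_len = max(map(len, sentence_batch))
--
--     def go(batch):
--         if not batch:
--             return []
--         s = batch[0]
--         row = (s + [pad_int] * (max_sent_len - len(s)))[:max_sent_len]
--         return [row] + go(batch[1:])
--
--     return go(sentence_batch)
-- ===== Notes on version B (the rewrite author's own statement) =====
-- stated objective: alternative
-- what changed: B resolves the target length once, then an explicit recursive helper walks the batch building each row pad-first-then-slice ((s + pads)[:m], one uniform expression where slicing does the truncation), replacing A's two iterative code paths with their per-row if/else.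
-- outside the precondition, e.g. on pad_sentence_batch([], 0, None): A raises ValueError, B raises ValueError
import Mathlib
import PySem

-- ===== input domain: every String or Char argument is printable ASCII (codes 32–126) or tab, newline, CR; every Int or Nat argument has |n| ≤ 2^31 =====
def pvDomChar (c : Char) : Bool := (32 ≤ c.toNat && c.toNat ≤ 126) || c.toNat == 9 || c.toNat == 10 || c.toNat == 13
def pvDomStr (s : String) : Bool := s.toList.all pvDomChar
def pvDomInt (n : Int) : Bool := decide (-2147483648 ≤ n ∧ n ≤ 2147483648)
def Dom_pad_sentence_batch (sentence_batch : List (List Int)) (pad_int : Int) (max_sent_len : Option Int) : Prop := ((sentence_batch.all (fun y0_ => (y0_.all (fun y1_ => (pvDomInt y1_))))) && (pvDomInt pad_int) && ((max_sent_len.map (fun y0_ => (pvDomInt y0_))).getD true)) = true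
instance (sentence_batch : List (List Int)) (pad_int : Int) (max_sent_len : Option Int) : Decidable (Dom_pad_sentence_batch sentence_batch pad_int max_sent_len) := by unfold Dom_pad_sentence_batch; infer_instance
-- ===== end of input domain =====

-- B recurses over the batch and builds each row pad-first-then-slice ((s+pads)[:m]),
-- replacing A's branchy iterative slice-or-pad; return value only, no speed claim.

-- ===== PORT A =====
def pad_sentence_batch (sentence_batch : List (List Int)) (pad_int : Int) (max_sent_len : Option Int) : List (List Int) :=
  match max_sent_len with
  | none =>
    -- max([len(sentence) for sentence in sentence_batch]); Pre_ excludes the empty batch (ValueError)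
    let m : Int := (PySem.List.max? (sentence_batch.map (fun s => (s.length : Int))) (fun x => x)).getD 0
    sentence_batch.map (fun s => s ++ List.replicate (m - (s.length : Int)).toNat pad_int)
  | some m =>
    sentence_batch.foldl (fun ret s =>
      if (s.length : Int) < m then
        ret ++ [s ++ List.replicate (m - (s.length : Int)).toNat pad_int]
      else
        ret ++ [PySem.List.slice s none (some m)]) []

-- ===== PORT B =====
-- the inner recursive 'go' of Source B ([pad]*(k) with k < 0 is [], hence '.toNat')
def pvGo_pad_sentence_batch (pad_int m : Int) (batch : List (List Int)) : List (List Int) :=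
  match batch with
  | [] => []
  | s :: rest =>
    let row := PySem.List.slice (s ++ List.replicate (m - (s.length : Int)).toNat pad_int) none (some m)
    [row] ++ pvGo_pad_sentence_batch pad_int m rest

def pad_sentence_batch_alt (sentence_batch : List (List Int)) (pad_int : Int) (max_sent_len : Option Int) : List (List Int) :=
  let m : Int :=
    match max_sent_len with
    | none => (PySem.List.max? (sentence_batch.map (fun s => (s.length : Int))) (fun x => x)).getD 0
    | some m => m
  pvGo_pad_sentence_batch pad_int m sentence_batch

-- ===== PRECONDITION & SPEC =====
-- Pre_ excludes only the empty batch with max_sent_len=None, where A (and B) raise ValueError on max of an empty sequence.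
def Pre_pad_sentence_batch (sentence_batch : List (List Int)) (pad_int : Int) (max_sent_len : Option Int) : Prop :=
  max_sent_len = none → sentence_batch ≠ []
instance (sentence_batch : List (List Int)) (pad_int : Int) (max_sent_len : Option Int) : Decidable (Pre_pad_sentence_batch sentence_batch pad_int max_sent_len) := by unfold Pre_pad_sentence_batch; infer_instance
def pvWitness_pad_sentence_batch : List (List Int) × Int × Option Int := ([[1, 2], [3]], 0, none)

def Spec_pad_sentence_batch (sentence_batch : List (List Int)) (pad_int : Int) (max_sent_len : Option Int) (out : List (List Int)) : Prop := out = pad_sentence_batch_alt sentence_batch pad_int max_sent_len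
instance (sentence_batch : List (List Int)) (pad_int : Int) (max_sent_len : Option Int) (out : List (List Int)) : Decidable (Spec_pad_sentence_batch sentence_batch pad_int max_sent_len out) := by unfold Spec_pad_sentence_batch; infer_instance

-- ===== CLAIM (what is proved, stated in full; the proofs are below) =====
def Claim_equal_pad_sentence_batch : Prop := ∀ (sentence_batch : List (List Int)) (pad_int : Int) (max_sent_len : Option Int), Dom_pad_sentence_batch sentence_batch pad_int max_sent_len → Pre_pad_sentence_batch sentence_batch pad_int max_sent_len → Spec_pad_sentence_batch sentence_batch pad_int max_sent_len (pad_sentence_batch sentence_batch pad_int max_sent_len)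

-- ===== LEMMAS AND PROOFS =====

-- A's append-in-loop with a two-way branch is map of the branched row expression
theorem foldl_branch_eq_map (c : List Int → Prop) [DecidablePred c]
    (f g : List Int → List Int) (sb : List (List Int)) (acc : List (List Int)) :
    sb.foldl (fun ret s => if c s then ret ++ [f s] else ret ++ [g s]) acc
      = acc ++ sb.map (fun s => if c s then f s else g s) := by
  have h : (fun (ret : List (List Int)) s => if c s then ret ++ [f s] else ret ++ [g s])
      = fun ret s => ret ++ [if c s then f s else g s] := by
    funext ret s; split_ifs <;> rfl
  rw [h, PySem.List.foldl_append_singleton_eq_map]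

-- B's recursion is map of its row expression
theorem go_eq_map (p m : Int) (batch : List (List Int)) :
    pvGo_pad_sentence_batch p m batch
      = batch.map (fun s =>
          PySem.List.slice (s ++ List.replicate (m - (s.length : Int)).toNat p) none (some m)) := by
  induction batch with
  | nil => rfl
  | cons s rest ih => simp [pvGo_pad_sentence_batch, ih]

-- when the target covers the sentence, slicing the padded row is the padded row
theorem row_padded_of_le {s : List Int} {m : Int} (p : Int) (h : (s.length : Int) ≤ m) :
    PySem.List.slice (s ++ List.replicate (m - (s.length : Int)).toNat p) none (some m)
      = s ++ List.replicate (m - (s.length : Int)).toNat p := by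
  rw [PySem.List.slice_to _ (le_trans (Int.natCast_nonneg _) h)]
  exact List.take_of_length_le (by simp; omega)

-- when it does not, no pad is produced and the slice is A's truncation
theorem row_padded_of_ge {s : List Int} {m : Int} (p : Int) (h : ¬ (s.length : Int) < m) :
    PySem.List.slice (s ++ List.replicate (m - (s.length : Int)).toNat p) none (some m)
      = PySem.List.slice s none (some m) := by
  have h0 : (m - (s.length : Int)).toNat = 0 := by omega
  rw [h0, List.replicate_zero, List.append_nil]

-- ===== VERDICT (by name: the statement is the Claim_ definition above) =====
theorem pad_sentence_batch_spec : Claim_equal_pad_sentence_batch := by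
  intro sb p m? _ hpre
  unfold Spec_pad_sentence_batch pad_sentence_batch pad_sentence_batch_alt
  cases m? with
  | none =>
    simp only
    rw [go_eq_map]
    apply List.map_congr_left
    intro s hs
    have hne : sb ≠ [] := hpre rfl
    set L := sb.map (fun s => (s.length : Int)) with hL
    have hLne : L ≠ [] := by simp [hL, hne]
    cases hmv : PySem.List.max? L (fun x => x) with
    | none => exact absurd ((PySem.List.max?_eq_none_iff L (fun x => x)).mp hmv) hLne
    | some mv =>
      have hle : (s.length : Int) ≤ mv := by
        have := PySem.List.max?_isMax hmv (s.length : Int)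
          (List.mem_map.mpr ⟨s, hs, rfl⟩)
        simpa using this
      simp only [Option.getD_some]
      rw [row_padded_of_le p hle]
  | some m =>
    simp only
    rw [go_eq_map, foldl_branch_eq_map (fun s => (s.length : Int) < m)]
    simp only [List.nil_append]
    apply List.map_congr_left
    intro s _
    by_cases h : (s.length : Int) < m
    · rw [if_pos h, row_padded_of_le p (le_of_lt h)]
    · rw [if_neg h, row_padded_of_ge p h]
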